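-- pv_equiv track=rewrite | github.com/vladavilov/playground | git-epic-creator/services/code_graph_ingestion_service/src/plugins/cobol/normalizer.py | _collapse_exec_blocks
-- ===== SOURCE A (Python) =====
-- def _collapse_exec_blocks(
--     logical_lines: list[str], logical_spans: list[tuple[int, int]]
-- ) -> tuple[list[str], list[tuple[int, int]]]:
--     out_lines: list[str] = []
--     out_spans: list[tuple[int, int]] = []
--
--     i = 0
--     while i < len(logical_lines):
--         line = logical_lines[i]
--         span = logical_spans[i]
--
--         if line.lstrip().upper().startswith("EXEC "):
--             start_span = span[0]
--             end_span = span[1]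
--             j = i + 1
--             while j < len(logical_lines):
--                 end_span = logical_spans[j][1]
--                 if "END-EXEC" in logical_lines[j].upper():
--                     j += 1
--                     break
--                 j += 1
--             out_lines.append("EXEC_BLOCK.")
--             out_spans.append((start_span, end_span))
--             i = j
--             continue
--
--         out_lines.append(line)
--         out_spans.append(span)
--         i += 1
--
--     return out_lines, out_spans
-- ===== SOURCE B (Python) =====
-- def _collapse_exec_blocks(
--     logical_lines: list[str], logical_spans: list[tuple[int, int]]
-- ) -> tuple[list[str], list[tuple[int, int]]]:
--     out_lines: list[str] = []
--     out_spans: list[tuple[int, int]] = []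
--
--     in_block = False
--     start = 0
--     end = 0
--     for i, line in enumerate(logical_lines):
--         span = logical_spans[i]
--         if in_block:
--             end = span[1]
--             if "END-EXEC" in line.upper():
--                 out_lines.append("EXEC_BLOCK.")
--                 out_spans.append((start, end))
--                 in_block = False
--         elif line.lstrip().upper().startswith("EXEC "):
--             in_block = True
--             start = span[0]
--             end = span[1]
--         else:
--             out_lines.append(line)
--             out_spans.append(span)
--
--     if in_block:
--         out_lines.append("EXEC_BLOCK.")
--         out_spans.append((start, end))
--
--     return out_lines, out_spans
-- ===== Notes on version B (the rewrite author's own statement) =====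
-- stated objective: simpler
-- what changed: Replaced A's nested while loops with index jumping (inner scan to find END-EXEC, then i = j) by a single flat for loop over enumerate carrying an in_block/start/end state machine with a final flush.
-- outside the precondition, e.g. on _collapse_exec_blocks(['MOVE A TO B.'], []): A raises IndexError, B raises IndexError
import Mathlib
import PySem

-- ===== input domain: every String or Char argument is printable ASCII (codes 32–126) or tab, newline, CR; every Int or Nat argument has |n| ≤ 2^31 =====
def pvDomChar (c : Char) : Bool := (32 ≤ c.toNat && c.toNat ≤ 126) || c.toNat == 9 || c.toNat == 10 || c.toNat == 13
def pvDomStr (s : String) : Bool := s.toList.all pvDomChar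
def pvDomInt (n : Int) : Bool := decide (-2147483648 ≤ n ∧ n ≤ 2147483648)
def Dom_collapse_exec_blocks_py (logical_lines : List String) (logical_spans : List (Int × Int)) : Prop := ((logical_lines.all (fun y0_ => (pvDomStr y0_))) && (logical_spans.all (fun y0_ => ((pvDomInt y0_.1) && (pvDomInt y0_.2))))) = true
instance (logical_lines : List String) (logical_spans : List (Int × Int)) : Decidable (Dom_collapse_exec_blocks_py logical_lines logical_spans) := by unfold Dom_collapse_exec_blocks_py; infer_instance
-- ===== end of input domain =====

-- B replaces A's nested while loops with index jumping by a single flat pass carrying an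
-- in_block/start/end state machine (objective: simpler decomposition, same O(n) cost).

-- line.lstrip().upper().startswith("EXEC ")
def pvIsExec (line : String) : Bool :=
  PySem.Str.startswith (PySem.Str.upper (PySem.Str.lstrip line)) "EXEC "

-- "END-EXEC" in line.upper()
def pvHasEnd (line : String) : Bool :=
  PySem.Str.isIn "END-EXEC" (PySem.Str.upper line)

-- ===== PORT A =====
-- A's inner while: walks j forward, updating end_span, breaking past an END-EXEC line.
-- Returns (end_span, next i).  Structural recursion on a fuel counter (fuel = len(lines)
-- bounds the remaining iterations; with enough fuel it is exactly A's loop).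
-- (Under Pre_, the getD defaults are never used.)
def pvInnerA (lines : List String) (spans : List (Int × Int)) (fuel j : Nat) (e : Int) : Int × Nat :=
  match fuel with
  | 0 => (e, j)
  | fuel + 1 =>
    if j < lines.length then
      let e' := (spans.getD j (0, 0)).2
      if pvHasEnd (lines.getD j "") then (e', j + 1)
      else pvInnerA lines spans fuel (j + 1) e'
    else (e, j)

-- A's outer while over index i with the jump i := j after a block (fuel likewise).
def pvOuterA (lines : List String) (spans : List (Int × Int)) (fuel i : Nat)
    (outL : List String) (outS : List (Int × Int)) : List String × List (Int × Int) :=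
  match fuel with
  | 0 => (outL, outS)
  | fuel + 1 =>
    if i < lines.length then
      let line := lines.getD i ""
      let span := spans.getD i (0, 0)
      if pvIsExec line then
        let r := pvInnerA lines spans lines.length (i + 1) span.2
        pvOuterA lines spans fuel r.2 (outL ++ ["EXEC_BLOCK."]) (outS ++ [(span.1, r.1)])
      else
        pvOuterA lines spans fuel (i + 1) (outL ++ [line]) (outS ++ [span])
    else (outL, outS)

def collapse_exec_blocks_py (logical_lines : List String) (logical_spans : List (Int × Int)) :
    List String × (List (Int × Int)) :=
  pvOuterA logical_lines logical_spans logical_lines.length 0 [] []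

-- ===== PORT B =====
-- one iteration of B's for loop; state = ((out_lines, out_spans), (in_block, start, end))
def pvStepB (spans : List (Int × Int))
    (st : (List String × List (Int × Int)) × (Bool × Int × Int))
    (p : Int × String) : (List String × List (Int × Int)) × (Bool × Int × Int) :=
  let span := PySem.List.pyGetD spans p.1 (0, 0)
  match st with
  | ((outL, outS), (inb, s, e)) =>
    if inb then
      let e' := span.2
      if pvHasEnd p.2 then ((outL ++ ["EXEC_BLOCK."], outS ++ [(s, e')]), (false, s, e'))
      else ((outL, outS), (true, s, e'))
    else if pvIsExec p.2 then ((outL, outS), (true, span.1, span.2))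
    else ((outL ++ [p.2], outS ++ [span]), (false, s, e))

-- the trailing 'if in_block: flush'
def pvFinishB (st : (List String × List (Int × Int)) × (Bool × Int × Int)) :
    List String × List (Int × Int) :=
  if st.2.1 then (st.1.1 ++ ["EXEC_BLOCK."], st.1.2 ++ [(st.2.2.1, st.2.2.2)]) else st.1

def collapse_exec_blocks_py_alt (logical_lines : List String) (logical_spans : List (Int × Int)) :
    List String × (List (Int × Int)) :=
  pvFinishB ((PySem.List.enumerate logical_lines 0).foldl (pvStepB logical_spans)
    (([], []), (false, 0, 0)))

-- ===== PRECONDITION & SPEC =====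
-- Pre_ excludes exactly the inputs with fewer spans than lines, on which Python A raises IndexError.
def Pre_collapse_exec_blocks_py (logical_lines : List String) (logical_spans : List (Int × Int)) : Prop :=
  logical_lines.length ≤ logical_spans.length
instance (logical_lines : List String) (logical_spans : List (Int × Int)) : Decidable (Pre_collapse_exec_blocks_py logical_lines logical_spans) := by unfold Pre_collapse_exec_blocks_py; infer_instance

def pvWitness_collapse_exec_blocks_py : List String × (List (Int × Int)) :=
  (["EXEC SQL", "END-EXEC.", "MOVE A TO B."], [(1, 2), (3, 4), (5, 6)])

def Spec_collapse_exec_blocks_py (logical_lines : List String) (logical_spans : List (Int × Int)) (out : List String × (List (Int × Int))) : Prop := out = collapse_exec_blocks_py_alt logical_lines logical_spans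
instance (logical_lines : List String) (logical_spans : List (Int × Int)) (out : List String × (List (Int × Int))) : Decidable (Spec_collapse_exec_blocks_py logical_lines logical_spans out) := by unfold Spec_collapse_exec_blocks_py; infer_instance

-- ===== CLAIM (what is proved, stated in full; the proofs are below) =====
def Claim_equal_collapse_exec_blocks_py : Prop := ∀ (logical_lines : List String) (logical_spans : List (Int × Int)), Dom_collapse_exec_blocks_py logical_lines logical_spans → Pre_collapse_exec_blocks_py logical_lines logical_spans → Spec_collapse_exec_blocks_py logical_lines logical_spans (collapse_exec_blocks_py logical_lines logical_spans)

-- ===== LEMMAS AND PROOFS =====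

theorem pvInnerA_le (lines : List String) (spans : List (Int × Int)) (fuel : Nat) :
    ∀ (j : Nat) (e : Int), j ≤ (pvInnerA lines spans fuel j e).2 := by
  induction fuel with
  | zero => intro j e; simp [pvInnerA]
  | succ n ih =>
    intro j e
    simp only [pvInnerA]
    split_ifs with h1 h2
    · omega
    · have := ih (j + 1) (spans.getD j (0, 0)).2; omega
    · omega

theorem pv_getD_eq (lines : List String) (j : Nat) (h : j < lines.length) :
    lines.getD j "" = lines[j] := by
  simp [List.getD_eq_getElem?_getD, List.getElem?_eq_getElem h]

theorem pv_drop_enum (lines : List String) (j : Nat) (h : j < lines.length) :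
    (PySem.List.enumerate lines 0).drop j
      = ((j : Int), lines[j]) :: (PySem.List.enumerate lines 0).drop (j + 1) := by
  have hl : j < (PySem.List.enumerate lines 0).length := by
    simpa [PySem.List.length_enumerate] using h
  rw [List.drop_eq_getElem_cons hl]
  simp [PySem.List.getElem_enumerate]

theorem pv_drop_enum_nil (lines : List String) (j : Nat) (h : ¬ j < lines.length) :
    (PySem.List.enumerate lines 0).drop j = [] := by
  apply List.drop_eq_nil_of_le
  simp [PySem.List.length_enumerate]; omega

theorem pv_inner_corr (lines : List String) (spans : List (Int × Int)) (fuel : Nat) :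
    ∀ (j : Nat) (e s : Int) (acc : List String × List (Int × Int)),
      lines.length ≤ j + fuel →
      pvFinishB (((PySem.List.enumerate lines 0).drop j).foldl (pvStepB spans) (acc, (true, s, e)))
        = pvFinishB (((PySem.List.enumerate lines 0).drop (pvInnerA lines spans fuel j e).2).foldl
            (pvStepB spans)
            ((acc.1 ++ ["EXEC_BLOCK."], acc.2 ++ [(s, (pvInnerA lines spans fuel j e).1)]),
             (false, s, (pvInnerA lines spans fuel j e).1))) := by
  induction fuel with
  | zero =>
    intro j e s acc hn
    have hj : ¬ j < lines.length := by omega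
    simp [pvInnerA, pv_drop_enum_nil lines j hj, pvFinishB]
  | succ n ih =>
    intro j e s acc hn
    by_cases hj : j < lines.length
    · rw [pv_drop_enum lines j hj]
      simp only [pvInnerA, hj, if_true, pv_getD_eq lines j hj]
      by_cases hend : pvHasEnd lines[j]
      · simp [hend, pvStepB, PySem.List.pyGetD_natCast]
      · simp only [hend, List.foldl_cons]
        have hstep : pvStepB spans (acc, (true, s, e)) ((j : Int), lines[j])
            = (acc, (true, s, (spans.getD j (0, 0)).2)) := by
          simp [pvStepB, hend, PySem.List.pyGetD_natCast]
        rw [hstep]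
        simpa using ih (j + 1) (spans.getD j (0, 0)).2 s acc (by omega)
    · simp [pvInnerA, hj, pv_drop_enum_nil lines j hj, pvFinishB]

theorem pv_outer_corr (lines : List String) (spans : List (Int × Int)) (fuel : Nat) :
    ∀ (i : Nat) (s e : Int) (acc : List String × List (Int × Int)),
      lines.length ≤ i + fuel →
      pvOuterA lines spans fuel i acc.1 acc.2
        = pvFinishB (((PySem.List.enumerate lines 0).drop i).foldl (pvStepB spans)
            (acc, (false, s, e))) := by
  induction fuel with
  | zero =>
    intro i s e acc hn
    have hi : ¬ i < lines.length := by omega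
    simp [pvOuterA, pv_drop_enum_nil lines i hi, pvFinishB]
  | succ n ih =>
    intro i s e acc hn
    by_cases hi : i < lines.length
    · rw [pv_drop_enum lines i hi]
      simp only [pvOuterA, hi, if_true, List.foldl_cons, pv_getD_eq lines i hi]
      by_cases hex : pvIsExec lines[i]
      · have hstep : pvStepB spans (acc, (false, s, e)) ((i : Int), lines[i])
            = (acc, (true, (spans.getD i (0, 0)).1, (spans.getD i (0, 0)).2)) := by
          simp [pvStepB, hex, PySem.List.pyGetD_natCast]
        rw [hstep]
        simp only [hex, if_true]
        rw [pv_inner_corr lines spans lines.length (i + 1)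
          (spans.getD i (0, 0)).2 (spans.getD i (0, 0)).1 acc (by omega)]
        have hle := pvInnerA_le lines spans lines.length (i + 1) (spans.getD i (0, 0)).2
        exact ih (pvInnerA lines spans lines.length (i + 1) (spans.getD i (0, 0)).2).2
          (spans.getD i (0, 0)).1 (pvInnerA lines spans lines.length (i + 1) (spans.getD i (0, 0)).2).1
          (acc.1 ++ ["EXEC_BLOCK."],
           acc.2 ++ [((spans.getD i (0, 0)).1, (pvInnerA lines spans lines.length (i + 1) (spans.getD i (0, 0)).2).1)])
          (by omega)
      · have hstep : pvStepB spans (acc, (false, s, e)) ((i : Int), lines[i])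
            = ((acc.1 ++ [lines[i]], acc.2 ++ [spans.getD i (0, 0)]), (false, s, e)) := by
          simp [pvStepB, hex, PySem.List.pyGetD_natCast]
        rw [hstep]
        simp only [hex]
        exact ih (i + 1) s e (acc.1 ++ [lines[i]], acc.2 ++ [spans.getD i (0, 0)]) (by omega)
    · simp [pvOuterA, hi, pv_drop_enum_nil lines i hi, pvFinishB]

-- ===== VERDICT (by name: the statement is the Claim_ definition above) =====
theorem collapse_exec_blocks_py_spec : Claim_equal_collapse_exec_blocks_py := by
  intro lines spans _ _
  unfold Spec_collapse_exec_blocks_py collapse_exec_blocks_py collapse_exec_blocks_py_alt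
  have := pv_outer_corr lines spans lines.length 0 0 0 ([], []) (by omega)
  simpa using this
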